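-- pv_equiv track=rewrite | github.com/qiaoqy/rev2fwd-il | scripts/scripts_pick_place_simulator/plot_exp_progress.py | get_continuous_runs
-- ===== SOURCE A (Python) =====
-- def get_continuous_runs(a_list, b_list):
--     """
--     Return list of (start_0based, length) for maximal streaks where
--     BOTH Task A and Task B succeeded consecutively (no reset needed).
--     """
--     runs = []
--     current_start = None
--     current_len = 0
--     for i, (a, b) in enumerate(zip(a_list, b_list)):
--         if a == 1 and b == 1:
--             if current_start is None:
--                 current_start = i
--                 current_len = 1
--             else:
--                 current_len += 1
--         else:
--             if current_start is not None:
--                 runs.append((current_start, current_len))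
--             current_start = None
--             current_len = 0
--     if current_start is not None:
--         runs.append((current_start, current_len))
--     return runs
-- ===== SOURCE B (Python) =====
-- from itertools import groupby
--
--
-- def get_continuous_runs(a_list, b_list):
--     """
--     Return list of (start_0based, length) for maximal streaks where
--     BOTH Task A and Task B succeeded consecutively (no reset needed).
--     """
--     mask = [a == 1 and b == 1 for a, b in zip(a_list, b_list)]
--     runs = []
--     i = 0
--     for key, grp in groupby(mask):
--         n = len(list(grp))
--         if key:
--             runs.append((i, n))
--         i += n
--     return runs
-- ===== Notes on version B (the rewrite author's own statement) =====
-- stated objective: alternative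
-- what changed: Replaces A's current_start/current_len state machine with a mask of (a==1 and b==1) booleans grouped via itertools.groupby, emitting (index, group length) for True groups.
import Mathlib
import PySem

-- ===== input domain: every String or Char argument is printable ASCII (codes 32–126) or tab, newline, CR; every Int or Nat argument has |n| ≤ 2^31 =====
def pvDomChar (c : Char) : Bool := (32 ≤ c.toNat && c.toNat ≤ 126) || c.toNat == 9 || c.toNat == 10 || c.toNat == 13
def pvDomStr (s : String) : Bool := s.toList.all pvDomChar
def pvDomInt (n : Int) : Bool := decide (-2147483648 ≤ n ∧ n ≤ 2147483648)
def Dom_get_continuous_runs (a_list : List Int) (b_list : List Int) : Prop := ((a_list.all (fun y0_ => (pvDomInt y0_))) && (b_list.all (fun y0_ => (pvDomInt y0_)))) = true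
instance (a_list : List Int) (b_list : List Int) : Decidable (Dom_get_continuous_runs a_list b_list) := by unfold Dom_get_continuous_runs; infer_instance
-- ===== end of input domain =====

-- B replaces A's current_start/current_len state machine by a mask of (a==1 and b==1)
-- booleans grouped with itertools.groupby (objective: alternative decomposition, same cost).

-- ===== PORT A =====
-- step of A's for-loop: state = (runs, current_start, current_len)
def stepA (st : List (Int × Int) × Option Int × Int) (p : Int × Int × Int) :
    List (Int × Int) × Option Int × Int :=
  if p.2.1 = 1 ∧ p.2.2 = 1 then
    match st.2.1 with
    | none => (st.1, some p.1, 1)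
    | some s => (st.1, some s, st.2.2 + 1)
  else
    match st.2.1 with
    | none => (st.1, none, 0)
    | some s => (st.1 ++ [(s, st.2.2)], none, 0)

def get_continuous_runs (a_list : List Int) (b_list : List Int) : List (Int × Int) :=
  let st := (PySem.List.enumerate (a_list.zip b_list) 0).foldl stepA ([], none, 0)
  match st.2.1 with
  | some s => st.1 ++ [(s, st.2.2)]
  | none => st.1

-- ===== PORT B =====
-- itertools.groupby over the boolean mask: each step consumes one maximal group of
-- equal keys and advances the running index i by the group's length (exact port of Source B's loop)
def groupRuns : List Bool → Int → List (Int × Int)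
  | [], _ => []
  | x :: xs, i =>
    let n : Nat := 1 + (xs.takeWhile (· == x)).length
    let rest := xs.dropWhile (· == x)
    (if x then [(i, (n : Int))] else []) ++ groupRuns rest (i + (n : Int))
  termination_by xs _ => xs.length
  decreasing_by
    have := List.length_dropWhile_le (· == x) xs
    simp only [List.length_cons]; omega

def get_continuous_runs_alt (a_list : List Int) (b_list : List Int) : List (Int × Int) :=
  let mask := (a_list.zip b_list).map (fun p => decide (p.1 = 1 ∧ p.2 = 1))
  groupRuns mask 0

-- ===== PRECONDITION & SPEC =====
def Spec_get_continuous_runs (a_list : List Int) (b_list : List Int) (out : List (Int × Int)) : Prop := out = get_continuous_runs_alt a_list b_list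
instance (a_list : List Int) (b_list : List Int) (out : List (Int × Int)) : Decidable (Spec_get_continuous_runs a_list b_list out) := by unfold Spec_get_continuous_runs; infer_instance

-- ===== CLAIM (what is proved, stated in full; the proofs are below) =====
def Claim_equal_get_continuous_runs : Prop := ∀ (a_list : List Int) (b_list : List Int), Dom_get_continuous_runs a_list b_list → Spec_get_continuous_runs a_list b_list (get_continuous_runs a_list b_list)

-- ===== LEMMAS AND PROOFS =====

-- A's loop as a pure recursion over the boolean mask, with explicit state
def LA : List Bool → Int → Option Int → Int → List (Int × Int)
  | [], _, none, _ => []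
  | [], _, some st, len => [(st, len)]
  | true :: xs, s, none, _ => LA xs (s + 1) (some s) 1
  | true :: xs, s, some st, len => LA xs (s + 1) (some st) (len + 1)
  | false :: xs, s, none, _ => LA xs (s + 1) none 0
  | false :: xs, s, some st, len => (st, len) :: LA xs (s + 1) none 0

def flushA (st : List (Int × Int) × Option Int × Int) : List (Int × Int) :=
  match st.2.1 with
  | some s => st.1 ++ [(s, st.2.2)]
  | none => st.1

lemma foldA_eq_LA (l : List (Int × Int)) (s : Int) (acc : List (Int × Int))
    (cur : Option Int) (len : Int) :
    flushA ((PySem.List.enumerate l s).foldl stepA (acc, cur, len))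
      = acc ++ LA (l.map (fun p => decide (p.1 = 1 ∧ p.2 = 1))) s cur len := by
  induction l generalizing s acc cur len with
  | nil =>
    cases cur <;> simp [PySem.List.enumerate_nil, flushA, LA]
  | cons p l ih =>
    obtain ⟨x, y⟩ := p
    rw [PySem.List.enumerate_cons]
    by_cases h : x = 1 ∧ y = 1
    · cases cur with
      | none =>
        simp only [List.foldl_cons, stepA, List.map_cons, h, decide_true, and_self, if_true,
          LA, ih]
      | some st =>
        simp only [List.foldl_cons, stepA, List.map_cons, h, decide_true, and_self, if_true,
          LA, ih]
    · have hd : decide (x = 1 ∧ y = 1) = false := by simp [h]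
      cases cur with
      | none =>
        simp only [List.foldl_cons, stepA, if_neg h, List.map_cons, hd, LA, ih]
      | some st =>
        simp only [List.foldl_cons, stepA, if_neg h, List.map_cons, hd, LA, ih]
        simp [List.append_assoc]

lemma groupRuns_nil (i : Int) : groupRuns [] i = [] := by rw [groupRuns]

lemma groupRuns_false (xs : List Bool) (i : Int) :
    groupRuns (false :: xs) i = groupRuns xs (i + 1) := by
  cases xs with
  | nil => rw [groupRuns_nil, groupRuns]; simp [groupRuns_nil]
  | cons y ys =>
    cases y with
    | true => rw [groupRuns]; simp
    | false =>
      rw [groupRuns]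
      conv_rhs => rw [groupRuns]
      simp only [List.takeWhile_cons, List.dropWhile_cons]
      norm_num
      push_cast
      ring_nf

lemma LA_spec (xs : List Bool) : ∀ (s len st : Int),
    LA xs s none len = groupRuns xs s ∧
    LA xs s (some st) len
      = (st, len + ((xs.takeWhile (· == true)).length : Int))
          :: groupRuns (xs.dropWhile (· == true)) (s + ((xs.takeWhile (· == true)).length : Int)) := by
  induction xs with
  | nil => intro s len st; simp [LA, groupRuns_nil]
  | cons x xs ih =>
    intro s len st
    cases x with
    | true =>
      constructor
      · rw [LA, (ih (s + 1) 1 s).2, groupRuns]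
        norm_num
        push_cast
        ring_nf
      · rw [LA, (ih (s + 1) (len + 1) st).2]
        norm_num
        push_cast
        ring_nf
        exact ⟨trivial, trivial⟩
    | false =>
      constructor
      · rw [LA, (ih (s + 1) 0 st).1, groupRuns_false]
      · rw [LA, (ih (s + 1) 0 st).1, ← groupRuns_false]
        simp

-- ===== VERDICT (by name: the statement is the Claim_ definition above) =====
theorem get_continuous_runs_spec : Claim_equal_get_continuous_runs := by
  intro a_list b_list _
  unfold Spec_get_continuous_runs get_continuous_runs get_continuous_runs_alt
  have h := foldA_eq_LA (a_list.zip b_list) 0 [] none 0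
  simp only [flushA] at h
  rw [h, (LA_spec _ 0 0 0).1]
  simp
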